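-- pv_equiv track=rewrite | github.com/lkxg/MedVQA | scripts/prepare_med_vqa.py | find_first_existing
-- ===== SOURCE A (Python) =====
-- from typing import Any, Dict, List
--
-- def find_first_existing(columns: List[str], candidates: List[str], required: bool = True):
--     lower_map = {c.lower(): c for c in columns}
--     for cand in candidates:
--         if cand.lower() in lower_map:
--             return lower_map[cand.lower()]
--     if required:
--         raise ValueError(f"未找到列，候选={candidates}，实际列={columns}")
--     return None
-- ===== SOURCE B (Python) =====
-- def find_first_existing(columns, candidates, required=True):
--     rank = {}
--     for i, cand in enumerate(candidates):
--         rank.setdefault(cand.lower(), i)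
--     best = None
--     best_rank = len(candidates)
--     for col in columns:
--         r = rank.get(col.lower())
--         if r is not None and r < best_rank:
--             best, best_rank = col, r
--     if best is not None:
--         return best
--     if required:
--         raise ValueError(f"未找到列，候选={candidates}，实际列={columns}")
--     return None
-- ===== Notes on version B (the rewrite author's own statement) =====
-- stated objective: alternative
-- what changed: Inverts the traversal: instead of scanning candidates and looking each up in a lowercase->column dict, B indexes candidates once by first lowercase occurrence rank and makes a single pass over columns keeping the column with the smallest candidate rank; Pre_ excludes inputs where A raises ValueError (required with no case-insensitive match) and columns lists containing two distinct strings equal case-insensitively, where A's dict last-key-wins choice is accidental and B keeps the first column.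
-- outside the precondition, e.g. on find_first_existing(['Id', 'ID'], ['id'], True): A returns 'ID', B returns 'Id'
import Mathlib
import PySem

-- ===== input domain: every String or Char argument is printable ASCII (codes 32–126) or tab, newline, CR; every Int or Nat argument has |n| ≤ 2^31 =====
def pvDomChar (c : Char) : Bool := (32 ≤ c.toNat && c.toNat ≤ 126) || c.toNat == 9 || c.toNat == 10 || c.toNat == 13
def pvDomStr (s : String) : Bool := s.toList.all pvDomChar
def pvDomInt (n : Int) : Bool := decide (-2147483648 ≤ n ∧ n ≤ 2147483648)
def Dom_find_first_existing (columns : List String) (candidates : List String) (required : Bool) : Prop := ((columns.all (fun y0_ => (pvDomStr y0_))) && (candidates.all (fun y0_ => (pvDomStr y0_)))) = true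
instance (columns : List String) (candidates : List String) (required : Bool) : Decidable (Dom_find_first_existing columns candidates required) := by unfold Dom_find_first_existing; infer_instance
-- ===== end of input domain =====

-- B inverts A's traversal: it ranks each candidate lowercase by first occurrence once,
-- then makes a single pass over columns keeping the column with the smallest rank
-- (objective: alternative).

-- ===== PORT A =====
-- A's for-cand loop: first candidate whose lowercase is a key of the dict
def pvALoop (lower_map : PySem.Dict String String) : List String → Option String
  | [] => none
  | cand :: rest =>
    if lower_map.contains (PySem.Str.lower cand) then lower_map.get? (PySem.Str.lower cand)
    else pvALoop lower_map rest

def find_first_existing (columns : List String) (candidates : List String) (required : Bool) : Option String :=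
  let lower_map := columns.foldl (fun d c => d.insert (PySem.Str.lower c) c) PySem.Dict.empty
  match pvALoop lower_map candidates with
  | some v => some v
  | none => if required then none else none
    -- required = true with no match is Python's `raise ValueError`: no value; excluded by Pre_

-- ===== PORT B =====
-- B's first loop: rank[cand.lower()] = first index, via dict.setdefault
def pvRank (candidates : List String) : PySem.Dict String Int :=
  (PySem.List.enumerate candidates 0).foldl
    (fun d p => d.setdefault (PySem.Str.lower p.2) p.1) PySem.Dict.empty

-- B's loop body over columns: r = rank.get(col.lower()); keep col if r is not None and r < best_rank
def pvBestStep (rank : PySem.Dict String Int) (st : Option String × Int) (col : String) :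
    Option String × Int :=
  match rank.get? (PySem.Str.lower col) with
  | some r => if r < st.2 then (some col, r) else st
  | none => st

def find_first_existing_alt (columns : List String) (candidates : List String) (required : Bool) : Option String :=
  let rank := pvRank candidates
  let st := columns.foldl (pvBestStep rank) (none, (candidates.length : Int))
  match st.1 with
  | some best => some best
  | none => if required then none else none
    -- required = true with no match is Python's `raise ValueError`: no value; excluded by Pre_

-- ===== PRECONDITION & SPEC =====
-- Pre_ excludes (a) the inputs where A raises ValueError (required = true with no
-- case-insensitive match) and (b) columns lists containing two distinct strings that are
-- equal case-insensitively, where A's dict last-key-wins choice is accidental and B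
-- naturally keeps the first such column.
def Pre_find_first_existing (columns : List String) (candidates : List String) (required : Bool) : Prop :=
  (required = true → ∃ cand ∈ candidates, ∃ col ∈ columns, PySem.Str.lower col = PySem.Str.lower cand) ∧
  List.Pairwise (fun a b => PySem.Str.lower a = PySem.Str.lower b → a = b) columns
instance (columns : List String) (candidates : List String) (required : Bool) : Decidable (Pre_find_first_existing columns candidates required) := by unfold Pre_find_first_existing; infer_instance

def pvWitness_find_first_existing : List String × List String × Bool := (["QID", "Answer"], ["qid"], true)

def Spec_find_first_existing (columns : List String) (candidates : List String) (required : Bool) (out : Option String) : Prop := out = find_first_existing_alt columns candidates required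
instance (columns : List String) (candidates : List String) (required : Bool) (out : Option String) : Decidable (Spec_find_first_existing columns candidates required out) := by unfold Spec_find_first_existing; infer_instance

-- ===== CLAIM =====
def Claim_equal_find_first_existing : Prop := ∀ (columns : List String) (candidates : List String) (required : Bool), Dom_find_first_existing columns candidates required → Pre_find_first_existing columns candidates required → Spec_find_first_existing columns candidates required (find_first_existing columns candidates required)

-- ===== LEMMAS AND PROOFS =====

-- reference function both sides are reduced to: first candidate with a case-insensitive
-- match in columns, returning the FIRST matching column
def pvCandFind (columns : List String) : List String → Option String
  | [] => none
  | c :: rest =>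
    match columns.find? (fun col => PySem.Str.lower col == PySem.Str.lower c) with
    | some col => some col
    | none => pvCandFind columns rest

-- ---- A side ----

theorem pvDict_get_eq_fold (columns : List String) (k : String)
    (d : PySem.Dict String String) (acc : Option String) (h : d.get? k = acc) :
    (columns.foldl (fun d c => d.insert (PySem.Str.lower c) c) d).get? k
      = columns.foldl (fun found col => if PySem.Str.lower col == k then some col else found) acc := by
  induction columns generalizing d acc with
  | nil => simpa using h
  | cons c rest ih =>
    simp only [List.foldl_cons]
    apply ih
    rw [PySem.Dict.get?_insert, h]
    by_cases hk : k = PySem.Str.lower c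
    · simp [hk]
    · simp [hk, Ne.symm hk]

theorem pvFold_keep (k c : String) (cols : List String)
    (h : ∀ col ∈ cols, PySem.Str.lower col = k → col = c) :
    cols.foldl (fun found col => if PySem.Str.lower col == k then some col else found) (some c)
      = some c := by
  induction cols with
  | nil => rfl
  | cons x rest ih =>
    simp only [List.foldl_cons]
    by_cases hx : PySem.Str.lower x = k
    · rw [h x (List.mem_cons_self) hx] at *
      simp only [hx, beq_self_eq_true, if_true]
      exact ih (fun col hm he => h col (List.mem_cons_of_mem _ hm) he)
    · simp only [beq_eq_false_iff_ne.mpr hx, Bool.false_eq_true, if_false]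
      · exact ih (fun col hm he => h col (List.mem_cons_of_mem _ hm) he)

theorem pvLast_eq_find (k : String) (cols : List String)
    (hp : List.Pairwise (fun a b => PySem.Str.lower a = PySem.Str.lower b → a = b) cols) :
    cols.foldl (fun found col => if PySem.Str.lower col == k then some col else found) none
      = cols.find? (fun col => PySem.Str.lower col == k) := by
  induction cols with
  | nil => rfl
  | cons c rest ih =>
    rcases List.pairwise_cons.mp hp with ⟨hc, hrest⟩
    simp only [List.foldl_cons, List.find?]
    by_cases hk : PySem.Str.lower c = k
    · simp only [hk, beq_self_eq_true, if_true]
      exact pvFold_keep k c rest (fun col hm he => (hc col hm (hk.trans he.symm)).symm)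
    · simp only [beq_eq_false_iff_ne.mpr hk, Bool.false_eq_true, if_false]
      exact ih hrest

theorem pvALoop_eq_candFind (columns : List String)
    (hp : List.Pairwise (fun a b => PySem.Str.lower a = PySem.Str.lower b → a = b) columns)
    (cands : List String) :
    pvALoop (columns.foldl (fun d c => d.insert (PySem.Str.lower c) c) PySem.Dict.empty) cands
      = pvCandFind columns cands := by
  induction cands with
  | nil => rfl
  | cons c rest ih =>
    simp only [pvALoop, pvCandFind]
    rw [PySem.Dict.contains_eq_isSome_get?,
        pvDict_get_eq_fold columns (PySem.Str.lower c) PySem.Dict.empty none (PySem.Dict.get?_empty _),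
        pvLast_eq_find (PySem.Str.lower c) columns hp]
    cases columns.find? (fun col => PySem.Str.lower col == PySem.Str.lower c) with
    | none => simpa using ih
    | some col => simp

-- ---- B side ----

-- first index (from offset s) of a candidate whose lowercase is k
def pvFirstIdx : List String → String → Int → Option Int
  | [], _, _ => none
  | c :: rest, k, i => if PySem.Str.lower c == k then some i else pvFirstIdx rest k (i + 1)

theorem pvFirstIdx_ge (cands : List String) (k : String) :
    ∀ (s r : Int), pvFirstIdx cands k s = some r → s ≤ r := by
  induction cands with
  | nil => intro s r h; simp [pvFirstIdx] at h
  | cons c rest ih =>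
    intro s r h
    simp only [pvFirstIdx] at h
    split at h
    · injection h with h'; omega
    · have := ih (s + 1) r h; omega

theorem pvRank_get_aux (cands : List String) (s : Int) (d : PySem.Dict String Int) (k : String) :
    ((PySem.List.enumerate cands s).foldl (fun d p => d.setdefault (PySem.Str.lower p.2) p.1) d).get? k
      = match d.get? k with
        | some v => some v
        | none => pvFirstIdx cands k s := by
  induction cands generalizing s d with
  | nil => simp [PySem.List.enumerate_nil, pvFirstIdx]; cases d.get? k <;> rfl
  | cons c rest ih =>
    rw [PySem.List.enumerate_cons]
    simp only [List.foldl_cons, pvFirstIdx]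
    rw [ih]
    by_cases hk : k = PySem.Str.lower c
    · rw [hk, PySem.Dict.get?_setdefault_self]
      cases d.get? (PySem.Str.lower c) <;> simp
    · rw [PySem.Dict.get?_setdefault_of_ne _ _ hk]
      have : (PySem.Str.lower c == k) = false := beq_eq_false_iff_ne.mpr (Ne.symm hk)
      simp [this]

theorem pvRank_get (cands : List String) (k : String) :
    (pvRank cands).get? k = pvFirstIdx cands k 0 := by
  rw [pvRank, pvRank_get_aux]
  simp [PySem.Dict.get?_empty]

-- abstract step of B's columns loop
def pvStep (rv : String → Option Int) (st : Option String × Int) (col : String) :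
    Option String × Int :=
  match rv col with
  | some r => if r < st.2 then (some col, r) else st
  | none => st

theorem pvFold_stable (rv : String → Option Int) (s : Int)
    (hge : ∀ col r, rv col = some r → s ≤ r) (cols : List String) (b : Option String) :
    cols.foldl (pvStep rv) (b, s) = (b, s) := by
  induction cols with
  | nil => rfl
  | cons c rest ih =>
    simp only [List.foldl_cons]
    have hstep : pvStep rv (b, s) c = (b, s) := by
      unfold pvStep
      cases h : rv c with
      | none => rfl
      | some r => have := hge c r h; simp; omega
    rw [hstep, ih]

theorem pvFold_hit (rv : String → Option Int) (s : Int)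
    (hge : ∀ col r, rv col = some r → s ≤ r) (cols : List String) :
    ∀ (st : Option String × Int) (col₀ : String), s < st.2 →
      cols.find? (fun col => rv col == some s) = some col₀ →
      cols.foldl (pvStep rv) st = (some col₀, s) := by
  induction cols with
  | nil => intro st col₀ _ h; simp at h
  | cons c rest ih =>
    intro st col₀ hlt hfind
    simp only [List.foldl_cons]
    by_cases hc : rv c = some s
    · have : (rv c == some s) = true := by simp [hc]
      rw [List.find?_cons_of_pos (p := fun col => rv col == some s) this] at hfind
      injection hfind with h0; subst h0
      have hstep : pvStep rv st c = (some c, s) := by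
        unfold pvStep; rw [hc]; simp [hlt]
      rw [hstep]
      exact pvFold_stable rv s hge rest (some c)
    · have : (rv c == some s) = false := by simpa using hc
      rw [List.find?_cons_of_neg (p := fun col => rv col == some s) (by simp [this])] at hfind
      cases h : rv c with
      | none =>
        have hstep : pvStep rv st c = st := by unfold pvStep; rw [h]
        rw [hstep]; exact ih st col₀ hlt hfind
      | some r =>
        have hr : s ≤ r := hge c r h
        have hne : r ≠ s := by intro he; exact hc (by rw [h, he])
        have hsr : s < r := lt_of_le_of_ne hr (Ne.symm hne)
        have hstep : pvStep rv st c = if r < st.2 then (some c, r) else st := by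
          unfold pvStep; rw [h]
        rw [hstep]
        by_cases hrs : r < st.2
        · rw [if_pos hrs]; exact ih (some c, r) col₀ hsr hfind
        · rw [if_neg hrs]; exact ih st col₀ hlt hfind

-- the predicate "rank equals the offset s" is exactly "matches the head candidate"
theorem pvRvS (c : String) (rest : List String) (s : Int) (col : String) :
    (pvFirstIdx (c :: rest) (PySem.Str.lower col) s == some s)
      = (PySem.Str.lower col == PySem.Str.lower c) := by
  simp only [pvFirstIdx]
  by_cases h : PySem.Str.lower c = PySem.Str.lower col
  · simp [h]
  · have h1 : (PySem.Str.lower c == PySem.Str.lower col) = false := beq_eq_false_iff_ne.mpr h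
    have h2 : (PySem.Str.lower col == PySem.Str.lower c) = false :=
      beq_eq_false_iff_ne.mpr (Ne.symm h)
    rw [if_neg (by simp [h1]), h2]
    cases hv : pvFirstIdx rest (PySem.Str.lower col) (s + 1) with
    | none => simp
    | some r =>
      have := pvFirstIdx_ge rest (PySem.Str.lower col) (s + 1) r hv
      simp; omega

theorem pvMain (columns : List String) (cands : List String) (s : Int) :
    (columns.foldl (pvStep (fun col => pvFirstIdx cands (PySem.Str.lower col) s))
        (none, s + (cands.length : Int))).1
      = pvCandFind columns cands := by
  induction cands generalizing s with
  | nil =>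
    have : columns.foldl (pvStep (fun col => pvFirstIdx [] (PySem.Str.lower col) s))
        ((none : Option String), s + (([] : List String).length : Int))
        = (none, s + (([] : List String).length : Int)) :=
      pvFold_stable _ _ (fun col r h => by simp [pvFirstIdx] at h) columns none
    rw [this]; rfl
  | cons c rest ih =>
    cases hfind : columns.find? (fun col => PySem.Str.lower col == PySem.Str.lower c) with
    | some col₀ =>
      have hfind' : columns.find?
          (fun col => pvFirstIdx (c :: rest) (PySem.Str.lower col) s == some s) = some col₀ := by
        have hpred : (fun col => pvFirstIdx (c :: rest) (PySem.Str.lower col) s == some s)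
            = (fun col => PySem.Str.lower col == PySem.Str.lower c) :=
          funext (pvRvS c rest s)
        rw [hpred]; exact hfind
      have hlt : s < s + (((c :: rest)).length : Int) := by
        simp only [List.length_cons]; push_cast; omega
      rw [pvFold_hit _ s (fun col r h => pvFirstIdx_ge _ _ _ _ h) columns _ col₀ hlt hfind']
      simp only [pvCandFind]; rw [hfind]
    | none =>
      have hno : ∀ col ∈ columns, (PySem.Str.lower col == PySem.Str.lower c) = false := by
        intro col hm
        simpa using List.find?_eq_none.mp hfind col hm
      have hcong : ∀ col ∈ columns, ∀ (st : Option String × Int),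
          pvStep (fun col => pvFirstIdx (c :: rest) (PySem.Str.lower col) s) st col
            = pvStep (fun col => pvFirstIdx rest (PySem.Str.lower col) (s + 1)) st col := by
        intro col hm st
        have h1 : (PySem.Str.lower c == PySem.Str.lower col) = false := by
          have := beq_eq_false_iff_ne.mp (hno col hm)
          exact beq_eq_false_iff_ne.mpr (Ne.symm this)
        unfold pvStep
        simp only [pvFirstIdx, h1, Bool.false_eq_true, if_false]
      have hinit : s + (((c :: rest)).length : Int) = (s + 1) + ((rest).length : Int) := by
        simp only [List.length_cons]; push_cast; omega
      rw [PySem.List.foldl_congr_mem' columns _ _ _ hcong, hinit, ih (s + 1)]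
      simp only [pvCandFind]; rw [hfind]

-- ===== VERDICT =====
theorem find_first_existing_spec : Claim_equal_find_first_existing := by
  intro columns candidates required _ hpre
  unfold Spec_find_first_existing
  simp only [find_first_existing, find_first_existing_alt]
  have hA := pvALoop_eq_candFind columns hpre.2 candidates
  have hBstep : pvBestStep (pvRank candidates)
      = pvStep (fun col => pvFirstIdx candidates (PySem.Str.lower col) 0) := by
    funext st col
    unfold pvBestStep pvStep
    rw [pvRank_get]
  have hB : (columns.foldl (pvBestStep (pvRank candidates))
      ((none : Option String), (candidates.length : Int))).1 = pvCandFind columns candidates := by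
    rw [hBstep]
    have h0 : ((candidates.length : Int)) = 0 + (candidates.length : Int) := by omega
    rw [h0]
    exact pvMain columns candidates 0
  rw [hA, hB]
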